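-- pv_equiv track=rewrite | github.com/ASK1995/Leetcode | 3616.py | totalReplacements
-- ===== SOURCE A (Python) =====
-- from typing import List
--
-- def totalReplacements(ranks: List[int]) -> int:
--     replacements = 0
--     current = ranks[0]
--
--     for rank in ranks:
--         if(rank < current):
--             current = rank
--             replacements += 1
--
--     return replacements
-- ===== SOURCE B (Python) =====
-- from typing import List
--
-- def totalReplacements(ranks: List[int]) -> int:
--     # Build the prefix-minimum table, then count its strict drops.
--     pm = []
--     for r in ranks:
--         pm.append(r if not pm or r < pm[-1] else pm[-1])
--     return sum(b < a for a, b in zip(pm, pm[1:]))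
-- ===== Notes on version B (the rewrite author's own statement) =====
-- stated objective: alternative
-- what changed: B builds the prefix-minimum table in one pass and then counts its strict descents in a separate zip-pairwise pass, instead of A's single fused loop that tracks the current minimum and a counter together.
import Mathlib
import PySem

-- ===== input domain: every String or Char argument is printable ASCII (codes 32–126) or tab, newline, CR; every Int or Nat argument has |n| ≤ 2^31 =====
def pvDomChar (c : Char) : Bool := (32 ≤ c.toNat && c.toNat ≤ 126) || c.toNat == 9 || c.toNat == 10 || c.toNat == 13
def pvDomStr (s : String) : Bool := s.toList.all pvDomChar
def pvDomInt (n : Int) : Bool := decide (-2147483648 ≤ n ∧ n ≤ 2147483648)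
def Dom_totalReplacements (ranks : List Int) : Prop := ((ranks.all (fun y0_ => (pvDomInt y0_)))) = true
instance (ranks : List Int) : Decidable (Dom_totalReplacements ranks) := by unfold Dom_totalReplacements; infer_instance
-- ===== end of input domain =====

-- B builds the prefix-minimum table and counts its descents in a second pass, instead of A's fused loop; same cost, different decomposition (return-value equivalence; neither mutates its argument).

-- ===== PORT A =====
-- fused loop: state (current, replacements)
def totalReplacements (ranks : List Int) : Int :=
  match PySem.List.pyGet? ranks 0 with
  | none => 0   -- Python raises IndexError here; excluded by Pre_
  | some c =>
    (ranks.foldl (fun (st : Int × Int) r => if r < st.1 then (r, st.2 + 1) else st) (c, 0)).2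

-- ===== PORT B =====
-- pm.append(r if not pm or r < pm[-1] else pm[-1])
def pmStep (pm : List Int) (r : Int) : List Int :=
  pm ++ [match pm.getLast? with | none => r | some l => if r < l then r else l]

def totalReplacements_alt (ranks : List Int) : Int :=
  let pm := ranks.foldl pmStep []
  -- sum(b < a for a, b in zip(pm, pm[1:]))
  (pm.zip pm.tail).foldl (fun acc p => acc + (if p.2 < p.1 then 1 else 0)) 0

-- ===== PRECONDITION & SPEC =====
-- Pre_ excludes only the empty list, on which A raises IndexError (ranks[0]).
def Pre_totalReplacements (ranks : List Int) : Prop := ranks ≠ []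
instance (ranks : List Int) : Decidable (Pre_totalReplacements ranks) := by unfold Pre_totalReplacements; infer_instance
def pvWitness_totalReplacements : List Int := [3, 1, 2, 0]

def Spec_totalReplacements (ranks : List Int) (out : Int) : Prop := out = totalReplacements_alt ranks
instance (ranks : List Int) (out : Int) : Decidable (Spec_totalReplacements ranks out) := by unfold Spec_totalReplacements; infer_instance

-- ===== CLAIM (what is proved, stated in full; the proofs are below) =====
def Claim_equal_totalReplacements : Prop := ∀ (ranks : List Int), Dom_totalReplacements ranks → Pre_totalReplacements ranks → Spec_totalReplacements ranks (totalReplacements ranks)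

-- ===== LEMMAS AND PROOFS =====

-- number of times the running minimum starting at m drops along the list
def drops : Int → List Int → Int
  | _, [] => 0
  | m, r :: rest => if r < m then 1 + drops r rest else drops m rest

-- number of strict descents between adjacent elements
def countD : List Int → Int
  | a :: b :: rest => (if b < a then 1 else 0) + countD (b :: rest)
  | _ => 0

theorem aLoop_eq_drops (rest : List Int) : ∀ (m k : Int),
    (rest.foldl (fun (st : Int × Int) r => if r < st.1 then (r, st.2 + 1) else st) (m, k)).2
      = k + drops m rest := by
  induction rest with
  | nil => intro m k; simp [drops]
  | cons r rest ih =>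
    intro m k
    by_cases h : r < m <;> simp [List.foldl, h, drops, ih] <;> ring

theorem zipFold_eq_countD (l : List Int) : ∀ (acc : Int),
    (l.zip l.tail).foldl (fun acc p => acc + (if p.2 < p.1 then 1 else 0)) acc
      = acc + countD l := by
  induction l with
  | nil => intro acc; simp [countD]
  | cons a l ih =>
    intro acc
    cases l with
    | nil => simp [countD]
    | cons b rest =>
      simp only [List.tail, List.zip_cons_cons, List.foldl, countD]
      simp only [List.tail_cons] at ih
      rw [ih]
      ring

theorem countD_append (x : Int) : ∀ (pm : List Int) (m : Int), pm.getLast? = some m →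
    countD (pm ++ [x]) = countD pm + (if x < m then 1 else 0) := by
  intro pm
  induction pm with
  | nil => intro m h; simp at h
  | cons a pm ih =>
    intro m h
    cases pm with
    | nil =>
      simp [List.getLast?] at h
      subst h
      simp [countD]
    | cons b rest =>
      have h' : (b :: rest).getLast? = some m := by
        simpa [List.getLast?_cons_cons] using h
      have := ih m h'
      simp only [List.cons_append, countD] at *
      rw [this]
      ring

theorem pm_build (rest : List Int) : ∀ (pm : List Int) (m : Int), pm.getLast? = some m →
    countD (rest.foldl pmStep pm) = countD pm + drops m rest := by
  induction rest with
  | nil => intro pm m h; simp [drops]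
  | cons r rest ih =>
    intro pm m h
    have hstep : pmStep pm r = pm ++ [if r < m then r else m] := by
      simp [pmStep, h]
    have hlast : (pm ++ [if r < m then r else m]).getLast? = some (if r < m then r else m) := by
      simp
    have hIH := ih (pm ++ [if r < m then r else m]) (if r < m then r else m) hlast
    have hcd := countD_append (if r < m then r else m) pm m h
    have hdrop : drops m (r :: rest) = (if r < m then 1 else 0) + drops (if r < m then r else m) rest := by
      by_cases hr : r < m <;> simp [drops, hr]
    calc countD (List.foldl pmStep pm (r :: rest))
        = countD (List.foldl pmStep (pm ++ [if r < m then r else m]) rest) := by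
          rw [List.foldl_cons, hstep]
      _ = countD pm + ((if (if r < m then r else m) < m then 1 else 0) + drops (if r < m then r else m) rest) := by
          rw [hIH, hcd]; ring
      _ = countD pm + drops m (r :: rest) := by
          rw [hdrop]; by_cases hr : r < m <;> simp [hr]

-- ===== VERDICT (by name: the statement is the Claim_ definition above) =====

theorem totalReplacements_spec : Claim_equal_totalReplacements := by
  intro ranks _ hpre
  unfold Spec_totalReplacements totalReplacements totalReplacements_alt
  cases ranks with
  | nil => exact absurd rfl hpre
  | cons c rest =>
    simp only [PySem.List.pyGet?, PySem.List.pyIdx?]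
    norm_num
    have hpm : countD (rest.foldl pmStep [c]) = drops c rest := by
      have := pm_build rest [c] c (by simp)
      simpa [countD] using this
    rw [zipFold_eq_countD, show pmStep [] c = [c] from by simp [pmStep], hpm]
    simpa using aLoop_eq_drops rest c 0
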